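-- pv_equiv track=rewrite | github.com/AndreaBirouk/100_days_of_Python | Just_fun/fun.py | find_love
-- ===== SOURCE A (Python) =====
-- def find_love(name1, name2):
--     total1 = 0
--     total2 = 0
--     names = [name1, name2]
--
--     for letter in names:
--         for char in letter:
--             if char in 'tTrRuU':
--                 total1 += 1
--             elif char in 'lLoOvV':
--                 total2 += 1
--             elif char in 'eE':
--                 total1 += 1
--                 total2 += 1
--
--     love_score = str(total1) + str(total2)
--     return love_score
-- ===== SOURCE B (Python) =====
-- def find_love(name1, name2):
--     counts = {}
--     for char in name1 + name2:
--         counts[char] = counts.get(char, 0) + 1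
--     total1 = sum(counts.get(c, 0) for c in 'tTrRuUeE')
--     total2 = sum(counts.get(c, 0) for c in 'lLoOvVeE')
--     return str(total1) + str(total2)
-- ===== Notes on version B (the rewrite author's own statement) =====
-- stated objective: alternative
-- what changed: Replaced A's per-character if/elif classification inside a nested loop by one tallying pass that builds a character frequency dictionary, followed by fixed loops over the two eight-letter category sets that sum the tallied counts (the shared letters counted in both totals).
import Mathlib
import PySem

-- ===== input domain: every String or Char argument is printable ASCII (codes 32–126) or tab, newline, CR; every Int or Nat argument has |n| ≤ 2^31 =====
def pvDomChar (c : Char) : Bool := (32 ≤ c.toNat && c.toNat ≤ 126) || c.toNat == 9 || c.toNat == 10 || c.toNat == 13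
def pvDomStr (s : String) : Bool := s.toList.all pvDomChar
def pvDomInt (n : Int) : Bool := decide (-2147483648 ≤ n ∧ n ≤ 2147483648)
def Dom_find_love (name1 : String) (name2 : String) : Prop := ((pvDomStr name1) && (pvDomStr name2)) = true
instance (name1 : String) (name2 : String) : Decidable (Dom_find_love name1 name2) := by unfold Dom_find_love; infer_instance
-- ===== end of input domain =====

-- B replaces A's classifying if/elif scan by one tallying pass into a frequency map plus fixed loops over the category letter-sets (objective: alternative decomposition, same cost).


-- ===== PORT A =====
def pvStepA (acc : Int × Int) (c : Char) : Int × Int :=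
  if c ∈ "tTrRuU".toList then (acc.1 + 1, acc.2)
  else if c ∈ "lLoOvV".toList then (acc.1, acc.2 + 1)
  else if c ∈ "eE".toList then (acc.1 + 1, acc.2 + 1)
  else acc

def find_love (name1 : String) (name2 : String) : String :=
  let totals := [name1, name2].foldl (fun acc letter => letter.toList.foldl pvStepA acc) ((0 : Int), (0 : Int))
  PySem.Int.toStr totals.1 ++ PySem.Int.toStr totals.2

-- ===== PORT B =====
def find_love_alt (name1 : String) (name2 : String) : String :=
  let counts := (name1 ++ name2).toList.foldl (fun (d : PySem.Dict Char Int) c => d.insert c (d.getD c 0 + 1)) PySem.Dict.empty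
  let total1 := "tTrRuUeE".toList.foldl (fun (s : Int) c => s + counts.getD c 0) 0
  let total2 := "lLoOvVeE".toList.foldl (fun (s : Int) c => s + counts.getD c 0) 0
  PySem.Int.toStr total1 ++ PySem.Int.toStr total2

-- ===== PRECONDITION & SPEC =====
def Spec_find_love (name1 : String) (name2 : String) (out : String) : Prop := out = find_love_alt name1 name2
instance (name1 : String) (name2 : String) (out : String) : Decidable (Spec_find_love name1 name2 out) := by unfold Spec_find_love; infer_instance

-- ===== CLAIM (what is proved, stated in full; the proofs are below) =====
def Claim_equal_find_love : Prop := ∀ (name1 : String) (name2 : String), Dom_find_love name1 name2 → Spec_find_love name1 name2 (find_love name1 name2)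

-- ===== LEMMAS AND PROOFS =====

theorem pv_foldA (l : List Char) (acc : Int × Int) :
    l.foldl pvStepA acc =
      (acc.1 + l.countP (fun c => decide (c ∈ "tTrRuUeE".toList)),
       acc.2 + l.countP (fun c => decide (c ∈ "lLoOvVeE".toList))) := by
  have hT : "tTrRuU".toList = ['t','T','r','R','u','U'] := by decide
  have hL : "lLoOvV".toList = ['l','L','o','O','v','V'] := by decide
  have hE : "eE".toList = ['e','E'] := by decide
  have hTE : "tTrRuUeE".toList = ['t','T','r','R','u','U','e','E'] := by decide
  have hLE : "lLoOvVeE".toList = ['l','L','o','O','v','V','e','E'] := by decide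
  induction l generalizing acc with
  | nil => simp
  | cons a l ih =>
    simp only [List.foldl_cons, List.countP_cons, ih]
    unfold pvStepA
    rw [hT, hL, hE, hTE, hLE]
    by_cases h1 : a ∈ ['t','T','r','R','u','U']
    · rw [if_pos h1]; fin_cases h1 <;> simp <;> omega
    · by_cases h2 : a ∈ ['l','L','o','O','v','V']
      · rw [if_neg h1, if_pos h2]; fin_cases h2 <;> simp <;> omega
      · by_cases h3 : a ∈ ['e','E']
        · rw [if_neg h1, if_neg h2, if_pos h3]; fin_cases h3 <;> simp <;> omega
        · rw [if_neg h1, if_neg h2, if_neg h3]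
          simp only [List.mem_cons, List.not_mem_nil, or_false] at h1 h2 h3
          simp
          tauto

theorem pv_count_cons_countP (k : Char) (ks : List Char) (hk : k ∉ ks) (l : List Char) :
    l.count k + l.countP (fun c => decide (c ∈ ks)) = l.countP (fun c => decide (c ∈ k :: ks)) := by
  have hp : (fun c => decide (c ∈ k :: ks)) = (fun c => decide (c = k) || decide (c ∈ ks)) := by
    funext c; simp [List.mem_cons]
  rw [hp]
  induction l with
  | nil => simp
  | cons x l ih =>
    simp only [List.count_cons, List.countP_cons]
    by_cases hx : x = k
    · subst hx
      simp [hk]; omega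
    · by_cases hm : x ∈ ks <;> simp [hx, hm] <;> omega

theorem pv_sum_counts (ks : List Char) (l : List Char) : ks.Nodup → ∀ a : Int,
    ks.foldl (fun (s : Int) c => s + (l.count c : Int)) a = a + (l.countP (fun c => decide (c ∈ ks)) : Int) := by
  induction ks with
  | nil => intro _ a; simp
  | cons k ks ih =>
    intro hk a
    obtain ⟨hk1, hk2⟩ := List.nodup_cons.mp hk
    rw [List.foldl_cons, ih hk2]
    have h := pv_count_cons_countP k ks hk1 l
    omega

theorem pv_getD_counts (l : List Char) (v : Char) : ∀ d : PySem.Dict Char Int,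
    (l.foldl (fun (d : PySem.Dict Char Int) c => d.insert c (d.getD c 0 + 1)) d).getD v 0
      = d.getD v 0 + (l.count v : Int) := by
  induction l with
  | nil => intro d; simp
  | cons c l ih =>
    intro d
    rw [List.foldl_cons, ih]
    by_cases h : v = c
    · subst h
      rw [PySem.Dict.getD_insert_self]
      simp
      omega
    · rw [PySem.Dict.getD_insert_of_ne _ _ _ h]
      have : (c == v) = false := by simp [Ne.symm h]
      simp [List.count_cons, this]

theorem find_love_spec : Claim_equal_find_love := by
  intro name1 name2 _
  unfold Spec_find_love find_love find_love_alt
  simp only [List.foldl_cons, List.foldl_nil]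
  rw [pv_foldA, pv_foldA]
  have hcat : (name1 ++ name2).toList = name1.toList ++ name2.toList := by simp
  have hcnt : ∀ v : Char,
      ((name1 ++ name2).toList.foldl (fun (d : PySem.Dict Char Int) c => d.insert c (d.getD c 0 + 1)) PySem.Dict.empty).getD v 0
        = ((name1.toList ++ name2.toList).count v : Int) := by
    intro v; rw [pv_getD_counts, hcat]; simp
  have hsum : ∀ ks : List Char, ks.Nodup →
      ks.foldl (fun (s : Int) c => s +
        ((name1 ++ name2).toList.foldl (fun (d : PySem.Dict Char Int) c => d.insert c (d.getD c 0 + 1)) PySem.Dict.empty).getD c 0) 0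
        = (((name1.toList ++ name2.toList).countP (fun c => decide (c ∈ ks))) : Int) := by
    intro ks hks
    rw [PySem.List.foldl_congr_mem ks _
        (fun (s : Int) c => s + ((name1.toList ++ name2.toList).count c : Int)) 0
        (fun acc x _ => by rw [hcnt])]
    rw [pv_sum_counts ks _ hks 0]
    omega
  rw [hsum _ (by decide), hsum _ (by decide)]
  simp [List.countP_append]
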